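-- pv_equiv track=rewrite | github.com/RyanFleck/Projects | py/codesignal/uniqueDNASequences.py | uniqueDNASequences
-- ===== SOURCE A (Python) =====
-- def uniqueDNASequences(sequences):
--     # Store sequences in dict:
--     #  key: hash:int -> val: [unique-hashes:strings]
--     seqvals = {}
--
--     for seq in sequences:
--         hash = seqHash(seq)
--         if hash in seqvals.keys():
--             rotatedHash = False
--             for hashseq in seqvals[hash]:
--                 if rotated(seq, hashseq):
--                     rotatedHash = True
--                     break
--             if not rotatedHash:
--                 seqvals[hash].append(seq)
--
--         else:
--             seqvals[hash] = [seq]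
--
--     total = 0
--     for seqs in seqvals.keys():
--         total = total + len(seqvals[seqs])
--
--     return total
--
-- def seqHash(seq):
--     # Returns int with decimal places representing ACTG
--     A = seq.count('A') * 1000
--     C = seq.count('C') * 100
--     T = seq.count('T') * 10
--     G = seq.count('G')
--     return A + C + T + G
--
-- def rotated(seqA, seqB):
--
--     # Base case.
--     if seqA == seqB:
--         return True
--
--     # Otherwise, compare to all rotations:
--     rotated = seqA
--     for num in range(1, len(seqA), 1):
--         rotated = rotated[-1] + rotated[:-1]
--         if rotated == seqB:
--             return True
--
--     return False
-- ===== SOURCE B (Python) =====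
-- def uniqueDNASequences(sequences):
--     # Count sequences distinct up to rotation: one canonical (lexicographically
--     # minimal) rotation per sequence, collected into a set; return the set's size.
--     canon = set()
--     for s in sequences:
--         rots = [s[i:] + s[:i] for i in range(len(s))]
--         canon.add(min(rots) if rots else s)
--     return len(canon)
-- ===== Notes on version B (the rewrite author's own statement) =====
-- stated objective: faster
-- what changed: Replaces A's hash-bucketed representative list with a pairwise all-rotations comparison per new sequence by computing one canonical (lexicographically minimal) rotation per sequence and counting the distinct canonical forms in a set.
import Mathlib
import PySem

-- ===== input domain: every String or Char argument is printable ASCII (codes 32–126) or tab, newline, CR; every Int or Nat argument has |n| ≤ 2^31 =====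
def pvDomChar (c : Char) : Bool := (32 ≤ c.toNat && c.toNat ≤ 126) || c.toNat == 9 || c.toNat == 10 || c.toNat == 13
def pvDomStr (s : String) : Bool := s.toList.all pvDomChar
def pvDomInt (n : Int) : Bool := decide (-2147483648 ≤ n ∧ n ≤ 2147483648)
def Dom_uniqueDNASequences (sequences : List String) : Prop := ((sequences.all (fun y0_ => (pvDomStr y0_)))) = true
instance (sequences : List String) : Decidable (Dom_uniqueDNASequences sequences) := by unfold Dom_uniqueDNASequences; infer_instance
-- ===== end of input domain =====

-- B replaces A's hash-bucket + pairwise-rotation scan by one canonical (minimal)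
-- rotation per sequence collected into a set (objective: faster in a timing run).


-- ===== PORT A =====
def seqHashA (seq : String) : Int :=
  (PySem.Str.count seq "A" : Int) * 1000 + (PySem.Str.count seq "C" : Int) * 100 +
    (PySem.Str.count seq "T" : Int) * 10 + (PySem.Str.count seq "G" : Int)

-- one step 'rotated = rotated[-1] + rotated[:-1]'; the 'none' branch is Python's
-- IndexError on the empty string, which the loop of 'rotated' never reaches
def rotStepA (r : List Char) : List Char :=
  match PySem.List.pyGet? r (-1) with
  | some c => c :: PySem.List.slice r none (some (-1))
  | none => []

def rotatedA (seqA seqB : String) : Bool :=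
  if seqA == seqB then true
  else
    ((PySem.List.pyRange 1 (PySem.Str.len seqA) 1).foldl
      (fun (st : List Char × Bool) _ =>
        if st.2 then st
        else
          let r := rotStepA st.1
          (r, r == seqB.toList))
      (seqA.toList, false)).2

-- the body of A's first loop (one sequence into the dict)
def updA (d : PySem.Dict Int (List String)) (seq : String) : PySem.Dict Int (List String) :=
  match PySem.Dict.get? d (seqHashA seq) with
  | some lst =>
      if lst.foldl (fun found hashseq => if found then found else rotatedA seq hashseq) false
      then d
      else PySem.Dict.insert d (seqHashA seq) (lst ++ [seq])
  | none => PySem.Dict.insert d (seqHashA seq) [seq]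

def uniqueDNASequences (sequences : List String) : Int :=
  let seqvals := sequences.foldl updA PySem.Dict.empty
  (PySem.Dict.keys seqvals).foldl
    (fun total k => total + ((PySem.Dict.getD seqvals k []).length : Int)) 0

-- ===== PORT B =====
-- [s[i:] + s[:i] for i in range(len(s))]
def rotationsB (l : List Char) : List (List Char) :=
  (List.range l.length).map (fun (i : Nat) =>
    PySem.List.slice l (some (i : Int)) none ++ PySem.List.slice l none (some (i : Int)))

-- min(rots) if rots else s
def canonB (l : List Char) : List Char :=
  match PySem.List.min? (rotationsB l) (fun x => x) with
  | some m => m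
  | none => l

def uniqueDNASequences_alt (sequences : List String) : Int :=
  PySem.Set.len (sequences.foldl
    (fun (st : PySem.Set (List Char)) s => PySem.Set.add st (canonB s.toList))
    PySem.Set.empty)

-- ===== PRECONDITION & SPEC =====
def Spec_uniqueDNASequences (sequences : List String) (out : Int) : Prop := out = uniqueDNASequences_alt sequences
instance (sequences : List String) (out : Int) : Decidable (Spec_uniqueDNASequences sequences out) := by unfold Spec_uniqueDNASequences; infer_instance

-- ===== CLAIM (what is proved, stated in full; the proofs are below) =====
def Claim_equal_uniqueDNASequences : Prop := ∀ (sequences : List String), Dom_uniqueDNASequences sequences → Spec_uniqueDNASequences sequences (uniqueDNASequences sequences)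

-- ===== LEMMAS AND PROOFS =====

-- ---- rotations and the canonical rotation ----
theorem rotationsB_eq (l : List Char) :
    rotationsB l = (List.range l.length).map (fun i => l.rotate i) := by
  unfold rotationsB
  refine List.map_congr_left (fun i hi => ?_)
  rw [List.mem_range] at hi
  rw [PySem.List.slice_from_natCast, PySem.List.slice_to_natCast,
    List.rotate_eq_drop_append_take (Nat.le_of_lt hi)]

theorem mem_rotationsB {l t : List Char} :
    t ∈ rotationsB l ↔ ∃ i < l.length, l.rotate i = t := by
  rw [rotationsB_eq]; simp [List.mem_map, List.mem_range]

theorem isRotated_iff_mem_rotationsB {l t : List Char} (h : l ≠ []) :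
    l ~r t ↔ t ∈ rotationsB l := by
  rw [mem_rotationsB]
  constructor
  · intro hr
    obtain ⟨n, hn, hrot⟩ := List.isRotated_iff_mod.mp hr
    rcases Nat.lt_or_ge n l.length with hlt | hge
    · exact ⟨n, hlt, hrot⟩
    · have hnl : n = l.length := le_antisymm hn hge
      exact ⟨0, List.length_pos_of_ne_nil h, by
        simpa [List.rotate_zero, hnl, List.rotate_length] using hrot⟩
  · rintro ⟨i, _, hrot⟩
    exact ⟨i, hrot⟩

theorem canonB_isRotated (l : List Char) : l ~r canonB l := by
  unfold canonB
  rcases hm : PySem.List.min? (rotationsB l) (fun x => x) with _ | m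
  · exact List.IsRotated.refl l
  · have hmem := PySem.List.min?_mem hm
    rw [mem_rotationsB] at hmem
    obtain ⟨i, _, hrot⟩ := hmem
    exact ⟨i, hrot⟩

theorem canonB_min (l : List Char) :
    ∀ t ∈ rotationsB l, canonB l ≤ t := by
  intro t ht
  unfold canonB
  rcases hm : PySem.List.min? (rotationsB l) (fun x => x) with _ | m
  · rw [PySem.List.min?_eq_none_iff] at hm
    rw [hm] at ht; simp at ht
  · have hm' : @PySem.List.min? (List Char) (List Char) LinearOrder.toPartialOrder.toLT
        LinearOrder.toDecidableLT (rotationsB l) (fun x => x) = some m := by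
      rw [← hm]; congr 1
    exact PySem.List.min?_isMin hm' t ht

theorem canonB_eq_of_isRotated {l l' : List Char} (h : l ~r l') :
    canonB l = canonB l' := by
  rcases eq_or_ne l [] with rfl | hne
  · have hl' : l' = [] := List.length_eq_zero_iff.mp (by simpa using h.perm.length_eq.symm)
    rw [hl']
  · have hne' : l' ≠ [] := by
      intro hl'
      exact hne (List.length_eq_zero_iff.mp (by simpa [hl'] using h.perm.length_eq))
    have h1 : canonB l ≤ canonB l' := by
      apply canonB_min
      rw [← isRotated_iff_mem_rotationsB hne]
      exact h.trans (canonB_isRotated l')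
    have h2 : canonB l' ≤ canonB l := by
      apply canonB_min
      rw [← isRotated_iff_mem_rotationsB hne']
      exact h.symm.trans (canonB_isRotated l)
    exact le_antisymm h1 h2

theorem canonB_eq_iff {l l' : List Char} : canonB l = canonB l' ↔ l ~r l' := by
  constructor
  · intro h
    exact (canonB_isRotated l).trans (h ▸ (canonB_isRotated l').symm)
  · exact canonB_eq_of_isRotated

-- ---- the hash is invariant under rotation ----
theorem chars_count_go_singleton (c : Char) :
    ∀ (l : List Char) (fuel acc : Nat), l.length ≤ fuel →
      PySem.Chars.count.go [c] fuel l acc = acc + l.count c := by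
  intro l
  induction l with
  | nil =>
      intro fuel acc _
      cases fuel <;> simp [PySem.Chars.count.go]
  | cons x t ih =>
      intro fuel acc hle
      cases fuel with
      | zero => simp at hle
      | succ f =>
          have hle' : t.length ≤ f := by simpa using hle
          simp only [PySem.Chars.count.go]
          by_cases hcx : c = x
          · subst hcx
            rw [if_pos (by simp [List.isPrefixOf])]
            simp only [List.length_cons, List.length_nil, Nat.zero_add, List.drop_succ_cons,
              List.drop_zero]
            rw [ih f (acc + 1) hle']
            simp only [List.count_cons, BEq.rfl, if_true]
            omega
          · rw [if_neg (by simp [List.isPrefixOf]; exact hcx)]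
            rw [ih f acc hle']
            have hxc : (x == c) = false := by
              simp only [beq_eq_false_iff_ne, ne_eq]
              exact fun h => hcx h.symm
            simp [List.count_cons, hxc]

theorem chars_count_singleton (c : Char) (l : List Char) :
    PySem.Chars.count l [c] = l.count c := by
  unfold PySem.Chars.count
  simp [chars_count_go_singleton c l l.length 0 le_rfl]

theorem seqHashA_rot {s r : String} (h : s.toList ~r r.toList) :
    seqHashA s = seqHashA r := by
  have hp := h.perm
  unfold seqHashA
  simp only [PySem.Str.count_eq]
  have hA : ("A" : String).toList = ['A'] := rfl
  have hC : ("C" : String).toList = ['C'] := rfl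
  have hT : ("T" : String).toList = ['T'] := rfl
  have hG : ("G" : String).toList = ['G'] := rfl
  rw [hA, hC, hT, hG]
  simp only [chars_count_singleton]
  rw [hp.count_eq 'A', hp.count_eq 'C', hp.count_eq 'T', hp.count_eq 'G']

-- ---- rotatedA decides the rotation relation ----
theorem pyGet?_neg_one_of_ne_nil {r : List Char} (h : r ≠ []) :
    PySem.List.pyGet? r (-1) = some (r.getLast h) := by
  have hpos : 0 < r.length := List.length_pos_of_ne_nil h
  simp [PySem.List.pyGet?, PySem.List.pyIdx?]
  rw [if_pos (by omega)]
  show r[r.length - 1]? = some (r.getLast h)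
  rw [List.getElem?_eq_getElem (by omega)]
  simp [List.getLast_eq_getElem]

theorem rotStepA_eq (r : List Char) : rotStepA r = r.rotate (r.length - 1) := by
  rcases eq_or_ne r [] with rfl | hne
  · rfl
  · unfold rotStepA
    rw [pyGet?_neg_one_of_ne_nil hne, PySem.List.slice_to_neg_one,
      List.rotate_eq_drop_append_take (by omega), List.drop_length_sub_one hne,
      List.dropLast_eq_take]
    rfl

def rotIterA : Nat → List Char → List Char
  | 0, r => r
  | (k+1), r => rotIterA k (rotStepA r)

theorem rotIterA_eq_rotate (k : Nat) (r : List Char) :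
    rotIterA k r = r.rotate (k * (r.length - 1)) := by
  induction k generalizing r with
  | zero => simp [rotIterA]
  | succ k ih =>
      show rotIterA k (rotStepA r) = _
      rw [ih, rotStepA_eq, List.rotate_rotate, List.length_rotate]
      congr 1
      ring

def loopA (t : List Char) : Nat → (List Char × Bool) → (List Char × Bool)
  | 0, st => st
  | (k+1), st => loopA t k (if st.2 then st else ((rotStepA st.1), (rotStepA st.1) == t))

theorem foldl_eq_loopA (t : List Char) :
    ∀ (l : List Int) (st : List Char × Bool),
      l.foldl (fun (st : List Char × Bool) _ =>
        if st.2 then st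
        else
          let r := rotStepA st.1
          (r, r == t)) st = loopA t l.length st := by
  intro l
  induction l with
  | nil => intro st; rfl
  | cons x xs ih =>
      intro st
      show xs.foldl _ _ = _
      rw [ih]
      rfl

theorem loopA_true (t : List Char) (k : Nat) (r : List Char) :
    loopA t k (r, true) = (r, true) := by
  induction k with
  | zero => rfl
  | succ k ih => simpa [loopA] using ih

theorem loopA_snd_iff (t : List Char) :
    ∀ (k : Nat) (r : List Char),
      (loopA t k (r, false)).2 = true ↔ ∃ m, 1 ≤ m ∧ m ≤ k ∧ rotIterA m r = t := by
  intro k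
  induction k with
  | zero =>
      intro r
      simp only [loopA]
      constructor
      · intro h; simp at h
      · rintro ⟨m, h1, h2, _⟩; omega
  | succ k ih =>
      intro r
      by_cases h : rotStepA r = t
      · have : loopA t (k+1) (r, false) = loopA t k (rotStepA r, true) := by
          simp [loopA, h]
        rw [this, loopA_true]
        simp only [true_iff]
        exact ⟨1, le_rfl, by omega, h⟩
      · have hbeq : (rotStepA r == t) = false := by
          simp [h]
        have : loopA t (k+1) (r, false) = loopA t k (rotStepA r, false) := by
          simp [loopA, hbeq]
        rw [this, ih]
        constructor
        · rintro ⟨m, h1, h2, h3⟩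
          exact ⟨m + 1, by omega, by omega, h3⟩
        · rintro ⟨m, h1, h2, h3⟩
          match m, h1 with
          | 1, _ => exact absurd h3 h
          | (m'+2), _ => exact ⟨m' + 1, by omega, by omega, h3⟩

theorem rotatedA_iff {s t : String} : rotatedA s t = true ↔ s.toList ~r t.toList := by
  by_cases h : s = t
  · subst h
    simp only [rotatedA, BEq.rfl, if_true, true_iff]
    exact List.IsRotated.refl _
  · have hbeq : (s == t) = false := by simp [h]
    have hln : s.toList ≠ t.toList := fun hl => h (String.toList_inj.mp hl)
    rw [rotatedA]
    rw [hbeq]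
    simp only [Bool.false_eq_true, if_false]
    rw [foldl_eq_loopA t.toList, PySem.Str.len_eq, PySem.List.length_pyRange_one]
    have hlen : ((s.toList.length : Int) - 1).toNat = s.toList.length - 1 := by omega
    rw [hlen, loopA_snd_iff]
    set n := s.toList.length with hn
    constructor
    · rintro ⟨m, _, _, h3⟩
      rw [rotIterA_eq_rotate] at h3
      exact ⟨m * (n - 1), h3⟩
    · intro hr
      have hnpos : 0 < n := by
        rcases Nat.eq_zero_or_pos n with h0 | h0
        · exfalso
          have hs : s.toList = [] := List.length_eq_zero_iff.mp h0
          have ht : t.toList = [] := List.length_eq_zero_iff.mp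
            (by rw [← hr.perm.length_eq]; exact h0)
          exact hln (by rw [hs, ht])
        · exact h0
      obtain ⟨j, hj_le, hrot⟩ := List.isRotated_iff_mod.mp hr
      have hj0 : j ≠ 0 := by
        rintro rfl; exact hln (by simpa using hrot)
      have hjn : j ≠ n := by
        rintro rfl
        exact hln (by rw [← hrot, hn, List.rotate_length])
      obtain ⟨m', hm'⟩ : ∃ m', n - j = m' + 1 := ⟨n - j - 1, by omega⟩
      refine ⟨n - j, by omega, by omega, ?_⟩
      rw [rotIterA_eq_rotate, hm']
      have hnj : n = j + m' + 1 := by omega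
      have hkey : (m' + 1) * (s.toList.length - 1) = m' * n + j := by
        rw [← hn, hnj]
        have : j + m' + 1 - 1 = j + m' := by omega
        rw [this]
        ring
      rw [hkey, ← List.rotate_rotate, mul_comm, hn, List.rotate_length_mul, hrot]

-- ---- A's inner found-loop is an 'any' ----
theorem foldl_or_any {α : Type} (f : α → Bool) :
    ∀ (l : List α) (b : Bool),
      l.foldl (fun found x => if found then found else f x) b = (b || l.any f) := by
  intro l
  induction l with
  | nil => intro b; simp
  | cons x xs ih => intro b; cases b <;> simp [ih]

-- ---- the loop invariant tying A's dict to B's set ----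
def repsOf (d : PySem.Dict Int (List String)) : List String :=
  d.items.flatMap (fun p => p.2)

def canonS (s : String) : List Char := canonB s.toList

def InvA (d : PySem.Dict Int (List String)) (st : PySem.Set (List Char)) : Prop :=
  (∀ p ∈ d.items, ∀ r ∈ p.2, seqHashA r = p.1) ∧
  d.keys.Nodup ∧
  ((repsOf d).map canonS).Nodup ∧
  (∀ c, c ∈ st ↔ c ∈ (repsOf d).map canonS) ∧
  st.Nodup

theorem mem_repsOf {d : PySem.Dict Int (List String)} {r : String} :
    r ∈ repsOf d ↔ ∃ p ∈ d.items, r ∈ p.2 := List.mem_flatMap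

-- the canonical form of seq occurs among the stored representatives iff A's
-- bucket scan at hash(seq) finds a rotation of seq
theorem canon_in_reps {d : PySem.Dict Int (List String)}
    (ha : ∀ p ∈ d.items, ∀ r ∈ p.2, seqHashA r = p.1) (hk : d.keys.Nodup) (seq : String) :
    canonS seq ∈ (repsOf d).map canonS ↔
      ∃ lst, PySem.Dict.get? d (seqHashA seq) = some lst ∧ ∃ r ∈ lst, rotatedA seq r = true := by
  constructor
  · intro hin
    obtain ⟨r, hr, hcr⟩ := List.mem_map.mp hin
    obtain ⟨p, hp, hrp⟩ := mem_repsOf.mp hr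
    have hrot : r.toList ~r seq.toList := canonB_eq_iff.mp hcr
    have hhash : seqHashA r = seqHashA seq := seqHashA_rot hrot
    have hp1 : p.1 = seqHashA seq := by rw [← ha p hp r hrp, hhash]
    have hget : PySem.Dict.get? d (seqHashA seq) = some p.2 := by
      rw [← hp1]
      exact PySem.Dict.get?_of_mem_items d (by simpa using hp) hk
    exact ⟨p.2, hget, r, hrp, rotatedA_iff.mpr hrot.symm⟩
  · rintro ⟨lst, hg, r, hr, hrot⟩
    have hmem_items := PySem.Dict.mem_items_of_get?_eq_some d hg
    have hreps : r ∈ repsOf d := mem_repsOf.mpr ⟨(seqHashA seq, lst), hmem_items, hr⟩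
    exact List.mem_map.mpr ⟨r, hreps, (canonB_eq_iff.mpr (rotatedA_iff.mp hrot)).symm⟩

-- inserting at an existing key rewrites exactly that bucket, in place
theorem insert_existing_items {d : PySem.Dict Int (List String)} {h : Int} {lst : List String}
    (hk : d.keys.Nodup) (hg : PySem.Dict.get? d h = some lst) (v : List String) :
    ∃ pre suf, d.items = pre ++ (h, lst) :: suf ∧
      (PySem.Dict.insert d h v).items = pre ++ (h, v) :: suf := by
  have hmem := PySem.Dict.mem_items_of_get?_eq_some d hg
  obtain ⟨pre, suf, hsplit⟩ := List.append_of_mem hmem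
  refine ⟨pre, suf, hsplit, ?_⟩
  have hcont : d.contains h = true := by rw [PySem.Dict.contains_eq_isSome_get?, hg]; rfl
  have hknd : (pre.map Prod.fst ++ h :: suf.map Prod.fst).Nodup := by
    have : d.keys = pre.map Prod.fst ++ h :: suf.map Prod.fst := by
      show d.items.map _ = _
      rw [hsplit]; simp
    rw [← this]; exact hk
  obtain ⟨h1, h2, hdisj⟩ := List.nodup_append.mp hknd
  have hpre_ne : ∀ p ∈ pre, p.1 ≠ h := by
    intro p hp he
    exact hdisj h (List.mem_map.mpr ⟨p, hp, he⟩) h (by simp) rfl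
  have hsuf_ne : ∀ p ∈ suf, p.1 ≠ h := by
    intro p hp he
    exact (List.nodup_cons.mp h2).1 (List.mem_map.mpr ⟨p, hp, he⟩)
  rw [PySem.Dict.items_insert_of_contains d v hcont, hsplit, List.map_append, List.map_cons]
  have hpre : pre.map (fun p => if (p.1 == h) = true then (h, v) else p) = pre := by
    refine (List.map_congr_left (fun p hp => ?_)).trans (List.map_id _)
    simp [hpre_ne p hp]
  have hsuf : suf.map (fun p => if (p.1 == h) = true then (h, v) else p) = suf := by
    refine (List.map_congr_left (fun p hp => ?_)).trans (List.map_id _)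
    simp [hsuf_ne p hp]
  rw [hpre, hsuf]
  simp

theorem set_add_of_mem {st : PySem.Set (List Char)} {c : List Char} (h : c ∈ st) :
    PySem.Set.add st c = st := by
  unfold PySem.Set.add
  rw [if_pos ((PySem.Set.contains_iff st c).mpr h)]

theorem set_add_of_not_mem {st : PySem.Set (List Char)} {c : List Char} (h : c ∉ st) :
    PySem.Set.add st c = st ++ [c] := by
  unfold PySem.Set.add
  rw [if_neg (fun hc => h ((PySem.Set.contains_iff st c).mp hc))]

theorem nodup_append_singleton {α : Type} {l : List α} {a : α}
    (h1 : l.Nodup) (h2 : a ∉ l) : (l ++ [a]).Nodup :=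
  ((List.perm_append_singleton a l).nodup_iff).mpr (List.nodup_cons.mpr ⟨h2, h1⟩)

theorem inv_step (d : PySem.Dict Int (List String)) (st : PySem.Set (List Char))
    (seq : String) (h : InvA d st) :
    InvA (updA d seq) (PySem.Set.add st (canonS seq)) := by
  obtain ⟨ha, hk, hnd2, hmem, hndst⟩ := h
  have hiff := canon_in_reps ha hk seq
  unfold updA
  cases hg : PySem.Dict.get? d (seqHashA seq) with
  | some lst =>
      show InvA
        (if lst.foldl (fun found hashseq => if found then found else rotatedA seq hashseq) false
         then d
         else PySem.Dict.insert d (seqHashA seq) (lst ++ [seq]))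
        (PySem.Set.add st (canonS seq))
      rw [foldl_or_any]
      simp only [Bool.false_or]
      by_cases hfound : lst.any (fun hashseq => rotatedA seq hashseq) = true
      · rw [if_pos hfound]
        obtain ⟨r, hr, hrot⟩ := List.any_eq_true.mp hfound
        have hc : canonS seq ∈ st := (hmem _).mpr (hiff.mpr ⟨lst, hg, r, hr, hrot⟩)
        rw [set_add_of_mem hc]
        exact ⟨ha, hk, hnd2, hmem, hndst⟩
      · rw [if_neg hfound]
        have hfresh : canonS seq ∉ (repsOf d).map canonS := by
          intro hin
          obtain ⟨lst', hg', r, hr, hrot⟩ := hiff.mp hin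
          rw [hg] at hg'
          injection hg' with e
          subst e
          exact hfound (List.any_eq_true.mpr ⟨r, hr, hrot⟩)
        have hcst : canonS seq ∉ st := fun hin => hfresh ((hmem _).mp hin)
        rw [set_add_of_not_mem hcst]
        obtain ⟨pre, suf, hsplit, hsplit'⟩ := insert_existing_items hk hg (lst ++ [seq])
        have hcont : d.contains (seqHashA seq) = true := by
          rw [PySem.Dict.contains_eq_isSome_get?, hg]; rfl
        have hreps : repsOf d =
            pre.flatMap (fun p => p.2) ++ (lst ++ suf.flatMap (fun p => p.2)) := by
          rw [repsOf, hsplit]; simp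
        have hreps' : repsOf (PySem.Dict.insert d (seqHashA seq) (lst ++ [seq])) =
            pre.flatMap (fun p => p.2) ++ ((lst ++ [seq]) ++ suf.flatMap (fun p => p.2)) := by
          rw [repsOf, hsplit']; simp
        have hperm : (repsOf (PySem.Dict.insert d (seqHashA seq) (lst ++ [seq]))).Perm
            (repsOf d ++ [seq]) := by
          rw [hreps, hreps']
          simp only [List.append_assoc]
          exact List.Perm.append_left _ (List.Perm.append_left _ List.perm_append_comm)
        have hpermc := hperm.map canonS
        rw [List.map_append] at hpermc
        refine ⟨?_, ?_, ?_, ?_, ?_⟩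
        · intro p hp r hr
          rw [hsplit'] at hp
          rcases List.mem_append.mp hp with hp | hp
          · exact ha p (by rw [hsplit]; exact List.mem_append_left _ hp) r hr
          · rcases List.mem_cons.mp hp with rfl | hp
            · rcases List.mem_append.mp hr with hr | hr
              · exact ha (seqHashA seq, lst) (by rw [hsplit]; simp) r hr
              · rw [List.mem_singleton.mp hr]
            · exact ha p (by rw [hsplit]; simp [hp]) r hr
        · rw [PySem.Dict.keys_insert_of_contains d _ hcont]
          exact hk
        · rw [hpermc.nodup_iff]
          simp only [List.map_cons, List.map_nil]
          exact nodup_append_singleton hnd2 hfresh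
        · intro c
          rw [hpermc.mem_iff]
          simp only [List.mem_append, List.map_cons, List.map_nil, List.mem_cons,
            List.not_mem_nil, or_false]
          rw [hmem c]
        · exact nodup_append_singleton hndst hcst
  | none =>
      show InvA (PySem.Dict.insert d (seqHashA seq) [seq]) (PySem.Set.add st (canonS seq))
      have hfresh : canonS seq ∉ (repsOf d).map canonS := by
        intro hin
        obtain ⟨lst', hg', _⟩ := hiff.mp hin
        rw [hg] at hg'
        exact Option.some_ne_none lst' hg'.symm
      have hcst : canonS seq ∉ st := fun hin => hfresh ((hmem _).mp hin)
      rw [set_add_of_not_mem hcst]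
      have hcont : d.contains (seqHashA seq) = false := by
        rw [PySem.Dict.contains_eq_isSome_get?, hg]; rfl
      have hitems := PySem.Dict.items_insert_of_not_contains d [seq] hcont
      have hreps' : repsOf (PySem.Dict.insert d (seqHashA seq) [seq]) =
          repsOf d ++ [seq] := by
        rw [repsOf, hitems]; simp [repsOf]
      refine ⟨?_, ?_, ?_, ?_, ?_⟩
      · intro p hp r hr
        rw [hitems] at hp
        rcases List.mem_append.mp hp with hp | hp
        · exact ha p hp r hr
        · rw [List.mem_singleton.mp hp] at hr ⊢
          rw [List.mem_singleton.mp hr]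
      · rw [PySem.Dict.keys_insert_of_not_contains d _ hcont]
        refine nodup_append_singleton hk ?_
        intro hkk
        have hc2 : d.contains (seqHashA seq) = true :=
          (PySem.Dict.contains_iff_mem_keys d _).mpr hkk
        rw [hcont] at hc2
        exact Bool.noConfusion hc2
      · rw [hreps', List.map_append]
        simp only [List.map_cons, List.map_nil]
        exact nodup_append_singleton hnd2 hfresh
      · intro c
        rw [hreps', List.map_append]
        simp only [List.mem_append, List.map_cons, List.map_nil, List.mem_cons,
          List.not_mem_nil, or_false]
        rw [hmem c]
      · exact nodup_append_singleton hndst hcst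

theorem inv_fold (sequences : List String) :
    ∀ (d : PySem.Dict Int (List String)) (st : PySem.Set (List Char)), InvA d st →
      InvA (sequences.foldl updA d)
        (sequences.foldl (fun (st : PySem.Set (List Char)) s => PySem.Set.add st (canonB s.toList)) st) := by
  induction sequences with
  | nil => intro d st h; exact h
  | cons x xs ih =>
      intro d st h
      exact ih _ _ (inv_step d st x h)

theorem inv_empty : InvA PySem.Dict.empty PySem.Set.empty := by
  refine ⟨?_, ?_, ?_, ?_, ?_⟩ <;>
    simp [repsOf, PySem.Dict.empty, PySem.Dict.keys, PySem.Set.empty]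

theorem count_from_inv (d : PySem.Dict Int (List String)) (st : PySem.Set (List Char))
    (h : InvA d st) :
    (PySem.Dict.keys d).foldl
      (fun total k => total + ((PySem.Dict.getD d k []).length : Int)) 0 = PySem.Set.len st := by
  obtain ⟨_, hk, hnd2, hmem, hndst⟩ := h
  rw [PySem.List.foldl_add]
  have hvals : List.map (fun k => PySem.Dict.getD d k []) (PySem.Dict.keys d) = d.values :=
    (PySem.Dict.values_eq_map_keys d hk []).symm
  have h1 : List.map (fun k => ((PySem.Dict.getD d k []).length : Int)) (PySem.Dict.keys d)
      = (d.values.map (fun v => (v.length : Int))) := by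
    rw [← hvals, List.map_map]
    rfl
  rw [h1]
  have h2 : (d.values.map (fun v => (v.length : Int))).sum
      = (((d.values.map List.length).sum : Nat) : Int) := by
    rw [Nat.cast_list_sum, List.map_map]
    rfl
  rw [h2]
  have h3 : (d.values.map List.length).sum = (repsOf d).length := by
    rw [repsOf, List.length_flatMap]
    show ((d.items.map (fun p => p.2)).map List.length).sum = _
    rw [List.map_map]
    rfl
  have hperm : st.Perm ((repsOf d).map canonS) :=
    (List.perm_ext_iff_of_nodup hndst hnd2).mpr hmem
  have h4 : (repsOf d).length = st.length := by
    have h5 := hperm.length_eq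
    simp only [List.length_map] at h5
    omega
  rw [h3, h4, zero_add]
  rfl

-- ===== VERDICT (by name: the statement is the Claim_ definition above) =====
theorem uniqueDNASequences_spec : Claim_equal_uniqueDNASequences := by
  intro sequences _
  unfold Spec_uniqueDNASequences uniqueDNASequences uniqueDNASequences_alt
  exact count_from_inv _ _ (inv_fold sequences _ _ inv_empty)
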